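-- pv_equiv track=rewrite | github.com/yuhyunjeong/python_algorithm_study | yuda/programmers_mock_test3/0823_03.py | solution
-- ===== SOURCE A (Python) =====
-- def solution(distance, scope, times):
--     answer = distance
--     for i in range(len(scope)):
--         for j in range(min(scope[i]), max(scope[i]) + 1):
--             T = j % sum(times[i])
--             if T <= times[i][0] and T != 0:
--                 answer = min(answer, j)
--     return answer
-- ===== SOURCE B (Python) =====
-- def solution(distance, scope, times):
--     # Per camera, the hit condition depends only on j % sum(times[i]), so it is
--     # periodic with period |s|: the earliest hit (if any) lies within the first
--     # |s| positions of the range. Scan only that window and stop at the first hit.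
--     answer = distance
--     for sc, tm in zip(scope, times):
--         lo, hi = min(sc), max(sc)
--         s = sum(tm)
--         t0 = tm[0]
--         limit = min(hi, lo + abs(s) - 1)
--         for j in range(lo, limit + 1):
--             t = j % s
--             if t != 0 and t <= t0:
--                 answer = min(answer, j)
--                 break
--     return answer
-- ===== Notes on version B (the rewrite author's own statement) =====
-- stated objective: faster
-- what changed: Instead of scanning every position of each camera's [min,max] range, B uses that the hit test depends only on j % sum(times[i]) (period |s|), scans at most the first |s| positions of the range and breaks at the first hit, which is the range's minimum hit.
import Mathlib
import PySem

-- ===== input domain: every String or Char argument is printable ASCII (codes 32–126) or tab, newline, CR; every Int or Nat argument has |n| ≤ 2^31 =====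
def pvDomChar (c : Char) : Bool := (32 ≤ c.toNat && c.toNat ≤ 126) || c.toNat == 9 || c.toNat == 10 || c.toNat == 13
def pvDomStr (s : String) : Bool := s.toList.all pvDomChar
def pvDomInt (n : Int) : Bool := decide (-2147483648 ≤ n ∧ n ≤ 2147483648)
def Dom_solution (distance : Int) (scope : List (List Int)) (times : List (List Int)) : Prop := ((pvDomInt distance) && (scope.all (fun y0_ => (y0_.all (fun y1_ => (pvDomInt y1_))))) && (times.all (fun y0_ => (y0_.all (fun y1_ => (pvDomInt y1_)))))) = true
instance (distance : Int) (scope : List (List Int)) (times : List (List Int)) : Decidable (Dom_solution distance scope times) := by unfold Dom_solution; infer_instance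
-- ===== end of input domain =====

-- B replaces A's full scan of each camera range by a scan of at most |sum(times[i])|
-- positions with an early break: the hit condition is periodic in j with period
-- |sum(times[i])|, so the earliest hit over the whole range lies in that first window.

-- ===== PORT A =====
def solution (distance : Int) (scope : List (List Int)) (times : List (List Int)) : Int :=
  (PySem.List.pyRange 0 (scope.length : Int) 1).foldl
    (fun answer i =>
      let sc := PySem.List.pyGetD scope i []
      let ti := PySem.List.pyGetD times i []
      (PySem.List.pyRange ((PySem.List.min? sc (fun y => y)).getD 0)
          ((PySem.List.max? sc (fun y => y)).getD 0 + 1) 1).foldl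
        (fun answer j =>
          let T := PySem.Int.mod j ti.sum
          if T ≤ PySem.List.pyGetD ti 0 0 ∧ T ≠ 0 then min answer j else answer)
        answer)
    distance

-- ===== PORT B =====
-- the inner `for … break` loop of Source B
def firstHit (s t0 : Int) : List Int → Option Int
  | [] => none
  | j :: rest =>
      let t := PySem.Int.mod j s
      if t ≠ 0 ∧ t ≤ t0 then some j else firstHit s t0 rest

def solution_alt (distance : Int) (scope : List (List Int)) (times : List (List Int)) : Int :=
  (scope.zip times).foldl
    (fun answer p =>
      let lo := (PySem.List.min? p.1 (fun y => y)).getD 0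
      let hi := (PySem.List.max? p.1 (fun y => y)).getD 0
      let s := p.2.sum
      let limit := min hi (lo + |s| - 1)
      match firstHit s (PySem.List.pyGetD p.2 0 0) (PySem.List.pyRange lo (limit + 1) 1) with
      | some j => min answer j
      | none => answer)
    distance

-- ===== PRECONDITION & SPEC =====
-- Pre_ excludes exactly the inputs where A raises: an index i < len(scope) with
-- times shorter (IndexError), scope[i] empty (ValueError on min), or sum(times[i]) = 0
-- (ZeroDivisionError on %).
def Pre_solution (distance : Int) (scope : List (List Int)) (times : List (List Int)) : Prop :=
  scope.length ≤ times.length ∧ ∀ p ∈ scope.zip times, p.1 ≠ [] ∧ p.2.sum ≠ 0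
instance (distance : Int) (scope : List (List Int)) (times : List (List Int)) : Decidable (Pre_solution distance scope times) := by unfold Pre_solution; infer_instance

def pvWitness_solution : Int × List (List Int) × List (List Int) := (10, [[3, 7]], [[2, 3]])

def Spec_solution (distance : Int) (scope : List (List Int)) (times : List (List Int)) (out : Int) : Prop := out = solution_alt distance scope times
instance (distance : Int) (scope : List (List Int)) (times : List (List Int)) (out : Int) : Decidable (Spec_solution distance scope times out) := by unfold Spec_solution; infer_instance

-- ===== CLAIM (what is proved, stated in full; the proofs are below) =====
def Claim_equal_solution : Prop := ∀ (distance : Int) (scope : List (List Int)) (times : List (List Int)), Dom_solution distance scope times → Pre_solution distance scope times → Spec_solution distance scope times (solution distance scope times)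

-- ===== LEMMAS AND PROOFS =====

-- A's per-camera body and B's per-camera body, factored for the proof
def bodyA (sc ti : List Int) (answer : Int) : Int :=
  (PySem.List.pyRange ((PySem.List.min? sc (fun y => y)).getD 0)
      ((PySem.List.max? sc (fun y => y)).getD 0 + 1) 1).foldl
    (fun answer j =>
      let T := PySem.Int.mod j ti.sum
      if T ≤ PySem.List.pyGetD ti 0 0 ∧ T ≠ 0 then min answer j else answer)
    answer

def bodyB (sc ti : List Int) (answer : Int) : Int :=
  let lo := (PySem.List.min? sc (fun y => y)).getD 0
  let hi := (PySem.List.max? sc (fun y => y)).getD 0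
  let s := ti.sum
  let limit := min hi (lo + |s| - 1)
  match firstHit s (PySem.List.pyGetD ti 0 0) (PySem.List.pyRange lo (limit + 1) 1) with
  | some j => min answer j
  | none => answer

-- Python's a % s is exactly characterised by divisibility plus the divisor-sign bounds
theorem pymod_unique (a s r : Int) (hs : s ≠ 0) (hd : s ∣ (a - r))
    (hb : (0 < s → 0 ≤ r ∧ r < s) ∧ (s < 0 → s < r ∧ r ≤ 0)) : PySem.Int.mod a s = r := by
  have hm : s ∣ (a - PySem.Int.mod a s) :=
    ⟨PySem.Int.floordiv a s, by have h := PySem.Int.floordiv_mul_add_mod a s; linarith⟩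
  obtain ⟨k, hk⟩ : s ∣ (PySem.Int.mod a s - r) := by
    have h2 := dvd_sub hd hm
    have h3 : (a - r) - (a - PySem.Int.mod a s) = PySem.Int.mod a s - r := by ring
    rwa [h3] at h2
  rcases lt_or_gt_of_ne hs with h | h
  · obtain ⟨b1, b2⟩ := PySem.Int.mod_neg_bounds (a := a) h
    obtain ⟨b3, b4⟩ := hb.2 h
    have hk0 : k = 0 := by
      rcases lt_trichotomy k 0 with hh | hh | hh
      · nlinarith
      · exact hh
      · nlinarith
    rw [hk0, mul_zero] at hk; omega
  · have b1 := PySem.Int.mod_nonneg (a := a) h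
    have b2 := PySem.Int.mod_lt (a := a) h
    obtain ⟨b3, b4⟩ := hb.1 h
    have hk0 : k = 0 := by
      rcases lt_trichotomy k 0 with hh | hh | hh
      · nlinarith
      · exact hh
      · nlinarith
    rw [hk0, mul_zero] at hk; omega

theorem pymod_sub_abs (j s : Int) (hs : s ≠ 0) :
    PySem.Int.mod (j - |s|) s = PySem.Int.mod j s := by
  apply pymod_unique _ _ _ hs
  · have hm : s ∣ (j - PySem.Int.mod j s) :=
      ⟨PySem.Int.floordiv j s, by have h := PySem.Int.floordiv_mul_add_mod j s; linarith⟩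
    have ha : s ∣ |s| := (dvd_abs s s).mpr dvd_rfl
    have := dvd_sub hm ha
    have h3 : (j - PySem.Int.mod j s) - |s| = (j - |s|) - PySem.Int.mod j s := by ring
    rwa [h3] at this
  · constructor
    · intro h
      exact ⟨PySem.Int.mod_nonneg j h, PySem.Int.mod_lt j h⟩
    · intro h
      exact PySem.Int.mod_neg_bounds j h

-- foldl of min over a ≤-sorted list keeps only the head
theorem foldl_min_sorted : ∀ (l : List Int), l.Pairwise (· ≤ ·) → ∀ a : Int,
    l.foldl min a = (match l.head? with | some h => min a h | none => a) := by
  intro l hl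
  induction l with
  | nil => intro a; rfl
  | cons h t ih =>
    intro a
    have hle : ∀ y ∈ t, h ≤ y := (List.pairwise_cons.mp hl).1
    have ht := ih (List.pairwise_cons.mp hl).2
    simp only [List.foldl_cons, ht]
    cases t with
    | nil => rfl
    | cons h2 t2 =>
      have : min (min a h) h2 = min a h := by
        have : h ≤ h2 := hle h2 (by simp)
        omega
      simpa using this

-- firstHit is head-of-filter
theorem firstHit_eq_head_filter (s t0 : Int) : ∀ l : List Int,
    firstHit s t0 l = (l.filter (fun j => decide (PySem.Int.mod j s ≤ t0 ∧ PySem.Int.mod j s ≠ 0))).head? := by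
  intro l
  induction l with
  | nil => rfl
  | cons j rest ih =>
    by_cases hc : PySem.Int.mod j s ≠ 0 ∧ PySem.Int.mod j s ≤ t0
    · simp [firstHit, hc.1, hc.2]
    · have hc' : ¬ (PySem.Int.mod j s ≤ t0 ∧ PySem.Int.mod j s ≠ 0) := by tauto
      simp only [firstHit, List.filter_cons]
      rw [if_neg hc]
      simp [hc', ih]

-- the fold of A's inner loop is a fold of min over the filtered range
theorem foldl_if_min (P : Int → Bool) : ∀ (l : List Int) (a : Int),
    l.foldl (fun ans j => if P j then min ans j else ans) a = (l.filter P).foldl min a := by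
  intro l
  induction l with
  | nil => intro a; rfl
  | cons j rest ih =>
    intro a
    by_cases h : P j <;> simp [h, ih]

-- periodicity kills hits above the first window
theorem no_hit_above (P : Int → Bool) (lo w : Int) (hw : 1 ≤ w)
    (hper : ∀ j : Int, P (j - w) = P j)
    (hnone : ∀ j : Int, lo ≤ j → j ≤ lo + w - 1 → P j = false) :
    ∀ n : Nat, ∀ j : Int, lo ≤ j → (j - lo).toNat = n → P j = false := by
  intro n
  induction n using Nat.strong_induction_on with
  | _ n ih =>
    intro j hj hn
    by_cases hsmall : j ≤ lo + w - 1
    · exact hnone j hj hsmall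
    · have h1 : lo ≤ j - w := by omega
      have h2 : (j - w - lo).toNat < n := by omega
      have := ih _ h2 (j - w) h1 rfl
      rwa [hper j] at this

-- the head of the filtered full range equals the head of the filtered first window
theorem head_filter_trunc (P : Int → Bool) (lo hi w : Int) (hw : 1 ≤ w)
    (hper : ∀ j : Int, P (j - w) = P j) :
    ((PySem.List.pyRange lo (hi + 1) 1).filter P).head?
      = ((PySem.List.pyRange lo (min hi (lo + w - 1) + 1) 1).filter P).head? := by
  by_cases h : hi ≤ lo + w - 1
  · rw [min_eq_left h]
  · rw [min_eq_right (by omega)]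
    have hsplit := PySem.List.pyRange_one_append lo (lo + w) (hi + 1) (by omega) (by omega)
    have harr : lo + w - 1 + 1 = lo + w := by ring
    rw [harr, hsplit, List.filter_append]
    cases hfil : (PySem.List.pyRange lo (lo + w) 1).filter P with
    | cons x xs => simp
    | nil =>
      simp only [List.nil_append]
      have hnone : ∀ j : Int, lo ≤ j → j ≤ lo + w - 1 → P j = false := by
        intro j h1 h2
        have hmem : j ∈ PySem.List.pyRange lo (lo + w) 1 :=
          (PySem.List.mem_pyRange_one).mpr ⟨h1, by omega⟩
        have := List.filter_eq_nil_iff.mp hfil j hmem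
        simpa using this
      have : (PySem.List.pyRange (lo + w) (hi + 1) 1).filter P = [] := by
        apply List.filter_eq_nil_iff.mpr
        intro j hmem
        obtain ⟨h1, h2⟩ := (PySem.List.mem_pyRange_one).mp hmem
        have := no_hit_above P lo w hw hper hnone (j - lo).toNat j (by omega) rfl
        simp [this]
      rw [this]

-- the per-camera equivalence
theorem camera_eq (sc ti : List Int) (a : Int) (hsc : sc ≠ []) (hs : ti.sum ≠ 0) :
    bodyA sc ti a = bodyB sc ti a := by
  obtain ⟨m, hm⟩ : ∃ m, PySem.List.min? sc (fun y => y) = some m := by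
    cases h : PySem.List.min? sc (fun y => y) with
    | none => exact absurd ((PySem.List.min?_eq_none_iff sc (fun y => y)).mp h) hsc
    | some m => exact ⟨m, rfl⟩
  obtain ⟨M, hM⟩ : ∃ M, PySem.List.max? sc (fun y => y) = some M := by
    cases h : PySem.List.max? sc (fun y => y) with
    | none => exact absurd ((PySem.List.max?_eq_none_iff sc (fun y => y)).mp h) hsc
    | some M => exact ⟨M, rfl⟩
  set s := ti.sum with hsdef
  set t0 := PySem.List.pyGetD ti 0 0 with ht0
  set P : Int → Bool := fun j => decide (PySem.Int.mod j s ≤ t0 ∧ PySem.Int.mod j s ≠ 0) with hP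
  have hw : (1:Int) ≤ |s| := by
    rcases lt_or_gt_of_ne hs with h | h <;> rw [abs] <;> omega
  have hper : ∀ j : Int, P (j - |s|) = P j := by
    intro j
    simp only [hP, pymod_sub_abs j s hs]
  unfold bodyA bodyB
  rw [hm, hM]
  simp only [Option.getD_some]
  have hfun : (fun (answer j : Int) =>
      if PySem.Int.mod j ti.sum ≤ PySem.List.pyGetD ti 0 0 ∧ PySem.Int.mod j ti.sum ≠ 0
      then min answer j else answer) = (fun ans j => if P j then min ans j else ans) := by
    funext ans j
    by_cases hc : PySem.Int.mod j s ≤ t0 ∧ PySem.Int.mod j s ≠ 0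
    · rw [if_pos hc, if_pos (by simp [hP, hc])]
    · rw [if_neg hc, if_neg (by simpa [hP] using hc)]
  rw [hfun, foldl_if_min P]
  have hsorted : ((PySem.List.pyRange m (M + 1) 1).filter P).Pairwise (· ≤ ·) :=
    ((PySem.List.pairwise_lt_pyRange_one m (M+1)).filter P).imp le_of_lt
  rw [foldl_min_sorted _ hsorted a]
  rw [head_filter_trunc P m M |s| hw hper]
  rw [firstHit_eq_head_filter]

-- fold over indices into two lists = fold over their zip
theorem foldl_index_eq_zip (g : List Int → List Int → Int → Int) :
    ∀ (scope times : List (List Int)) (a : Int), scope.length ≤ times.length →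
    (List.range scope.length).foldl (fun acc k => g (scope.getD k []) (times.getD k []) acc) a
      = (scope.zip times).foldl (fun acc p => g p.1 p.2 acc) a := by
  intro scope
  induction scope with
  | nil => intro times a _; rfl
  | cons sc scs ih =>
    intro times a hlen
    cases times with
    | nil => simp at hlen
    | cons ti tis =>
      simp only [List.length_cons, List.range_succ_eq_map, List.foldl_cons, List.foldl_map,
        List.getD_cons_zero, List.getD_cons_succ, List.zip_cons_cons]
      exact ih tis (g sc ti a) (by simpa using hlen)

theorem foldl_pyRange_nat (f : Int → Int → Int) (n : Nat) (a : Int) :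
    (PySem.List.pyRange 0 (n : Int) 1).foldl f a
      = (List.range n).foldl (fun acc (k : Nat) => f acc (k : Int)) a := by
  rw [PySem.List.pyRange_one]
  simp [List.foldl_map]

-- ===== VERDICT (by name: the statement is the Claim_ definition above) =====
theorem solution_spec : Claim_equal_solution := by
  intro distance scope times _ hpre
  obtain ⟨hlen, hp⟩ := hpre
  unfold Spec_solution
  have hA : solution distance scope times
      = (scope.zip times).foldl (fun acc p => bodyA p.1 p.2 acc) distance := by
    show (PySem.List.pyRange 0 (scope.length : Int) 1).foldl
        (fun acc i => bodyA (PySem.List.pyGetD scope i []) (PySem.List.pyGetD times i []) acc)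
        distance = _
    rw [foldl_pyRange_nat
      (fun acc i => bodyA (PySem.List.pyGetD scope i []) (PySem.List.pyGetD times i []) acc)
      scope.length distance]
    have hcast : (fun (acc : Int) (k : Nat) =>
        bodyA (PySem.List.pyGetD scope (k : Int) []) (PySem.List.pyGetD times (k : Int) []) acc)
        = (fun acc (k : Nat) => bodyA (scope.getD k []) (times.getD k []) acc) := by
      funext acc k
      rw [PySem.List.pyGetD_natCast, PySem.List.pyGetD_natCast]
    rw [hcast]
    exact foldl_index_eq_zip bodyA scope times distance hlen
  have hB : solution_alt distance scope times
      = (scope.zip times).foldl (fun acc p => bodyB p.1 p.2 acc) distance := rfl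
  rw [hA, hB]
  apply List.foldl_ext
  intro acc p hmem
  exact camera_eq p.1 p.2 acc (hp p hmem).1 (hp p hmem).2
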